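-- pv_equiv track=rewrite | github.com/robis1221/conformance-checking-c- | ProcessMiningPython/token_replay.py | make_xl_set
-- ===== SOURCE A (Python) =====
-- def check_set(A, ncs):
--     if None != ncs:
--         for event in A:
--             for event2 in A:
--                 if (event, event2) not in ncs:
--                     return False
--         return True
--     else:
--         return False
--
-- def check_outsets(A, B, cs):
--     for event in A:
--         for event2 in B:
--             if (event, event2) not in cs:
--                 return False
--     return True
--
-- def make_xl_set(all_tasks, direct_followers, causalities, no_causalities):
--     import itertools
--     xl = set()
--     subsets = set()
--     for i in range(1, len(all_tasks)):
--         for s in itertools.combinations(all_tasks, i):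
--             subsets.add(s)
--     for a in subsets:
--         reta = check_set(a, no_causalities)
--         for b in subsets:
--             retb = check_set(b, no_causalities)
--             if reta and retb and \
--                check_outsets(a, b, causalities):
--                 xl.add((a, b))
--     return xl
-- ===== SOURCE B (Python) =====
-- def make_xl_set(all_tasks, direct_followers, causalities, no_causalities):
--     if no_causalities is None:
--         return set()
--     ncs = set(no_causalities)
--     cs = set(causalities)
--
--     def cliques(acc, k, rest):
--         # every way to extend the ncs-clique acc by k elements drawn in order
--         # from rest; branches whose new element breaks the clique are pruned,
--         # so invalid subsets are never materialised.
--         if k == 0: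
--             return [tuple(acc)]
--         if not rest:
--             return []
--         x, xs = rest[0], rest[1:]
--         out = []
--         if (x, x) in ncs and all((z, x) in ncs and (x, z) in ncs for z in acc):
--             out += cliques(acc + [x], k - 1, xs)
--         out += cliques(acc, k, xs)
--         return out
--
--     valid = []
--     seen = set()
--     for k in range(1, len(all_tasks)):
--         for c in cliques([], k, all_tasks):
--             if c not in seen:
--                 seen.add(c)
--                 valid.append(c)
--
--     xl = set()
--     for a in valid:
--         # tasks reachable (by causality) from every element of a
--         succ = {y for y in all_tasks if all((x, y) in cs for x in a)}
--         for b in valid: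
--             if all(y in succ for y in b):
--                 xl.add((a, b))
--     return xl
-- ===== Notes on version B (the rewrite author's own statement) =====
-- stated objective: alternative
-- what changed: B generates only the no-causality cliques directly by pruned backtracking over the task list (invalid subsets are never enumerated, unlike A which materialises every proper subset and re-runs check_set for each of the |subsets|^2 ordered pairs), and replaces the per-pair causality scan by a successor set computed once per left subset, pairing via a subset test against it; intended as faster (a timing run saw A time out at n=16 where B still returned) but no ratio was measurable at sizes where both finish.
import Mathlib
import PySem

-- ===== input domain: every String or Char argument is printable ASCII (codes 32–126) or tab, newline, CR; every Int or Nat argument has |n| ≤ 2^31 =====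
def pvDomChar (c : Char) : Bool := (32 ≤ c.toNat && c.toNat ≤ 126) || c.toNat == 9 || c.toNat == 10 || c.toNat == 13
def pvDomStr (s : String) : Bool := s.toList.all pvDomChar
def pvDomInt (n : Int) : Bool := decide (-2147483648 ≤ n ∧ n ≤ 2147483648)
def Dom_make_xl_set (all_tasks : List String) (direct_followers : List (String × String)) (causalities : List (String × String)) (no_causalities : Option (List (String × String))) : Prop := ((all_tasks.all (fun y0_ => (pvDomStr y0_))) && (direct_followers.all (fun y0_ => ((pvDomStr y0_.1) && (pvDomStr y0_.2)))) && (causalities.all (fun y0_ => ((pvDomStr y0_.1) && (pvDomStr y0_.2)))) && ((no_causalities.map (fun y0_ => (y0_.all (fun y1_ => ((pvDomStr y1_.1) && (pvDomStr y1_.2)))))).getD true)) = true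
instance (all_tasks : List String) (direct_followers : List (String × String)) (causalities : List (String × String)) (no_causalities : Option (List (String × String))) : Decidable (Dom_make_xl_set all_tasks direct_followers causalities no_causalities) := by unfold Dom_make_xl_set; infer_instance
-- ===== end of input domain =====

-- B enumerates only the no-causality cliques directly by pruned backtracking (invalid
-- subsets are never materialised) and replaces the per-pair causality scan by a
-- successor set precomputed once per left subset; return values are identical.

-- ===== PORT A =====
-- itertools.combinations(xs, k), lexicographic by index (hand port, exact for k ≥ 0)
def pvCombos : Nat → List String → List (List String)
  | 0, _ => [[]]
  | _ + 1, [] => []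
  | k + 1, x :: xs => (pvCombos k xs).map (fun t => x :: t) ++ pvCombos (k + 1) xs

def pvCheckSet (A : List String) (ncs : Option (List (String × String))) : Bool :=
  match ncs with
  | some ncs => A.all (fun event => A.all (fun event2 => ncs.contains (event, event2)))
  | none => false

def pvCheckOutsets (A B : List String) (cs : List (String × String)) : Bool :=
  A.all (fun event => B.all (fun event2 => cs.contains (event, event2)))

def make_xl_set (all_tasks : List String) (direct_followers : List (String × String)) (causalities : List (String × String)) (no_causalities : Option (List (String × String))) : List (List String × List String) :=
  let subsets : PySem.Set (List String) :=
    (PySem.List.pyRange 1 (all_tasks.length : Int) 1).foldl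
      (fun st i => (pvCombos i.toNat all_tasks).foldl (fun st s => PySem.Set.add st s) st)
      PySem.Set.empty
  subsets.foldl
    (fun xl a =>
      let reta := pvCheckSet a no_causalities
      subsets.foldl
        (fun xl b =>
          let retb := pvCheckSet b no_causalities
          if reta && retb && pvCheckOutsets a b causalities then PySem.Set.add xl (a, b) else xl)
        xl)
    PySem.Set.empty

-- ===== PORT B =====
-- the new element x is compatible with the clique acc
def pvCompat (ncs : PySem.Set (String × String)) (acc : List String) (x : String) : Bool :=
  PySem.Set.contains ncs (x, x) &&
    acc.all (fun z => PySem.Set.contains ncs (z, x) && PySem.Set.contains ncs (x, z))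

-- every way to extend the clique acc by k elements drawn in order from rest (pruned)
def pvCliques (ncs : PySem.Set (String × String)) (acc : List String) :
    Nat → List String → List (List String)
  | 0, _ => [acc]
  | _ + 1, [] => []
  | k + 1, x :: xs =>
      (if pvCompat ncs acc x then pvCliques ncs (acc ++ [x]) k xs else []) ++
        pvCliques ncs acc (k + 1) xs

def make_xl_set_alt (all_tasks : List String) (direct_followers : List (String × String)) (causalities : List (String × String)) (no_causalities : Option (List (String × String))) : List (List String × List String) :=
  match no_causalities with
  | none => PySem.Set.empty
  | some ncl =>
    let ncs : PySem.Set (String × String) := PySem.Set.ofList ncl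
    let cs : PySem.Set (String × String) := PySem.Set.ofList causalities
    let valid : PySem.Set (List String) :=
      (PySem.List.pyRange 1 (all_tasks.length : Int) 1).foldl
        (fun st k => PySem.Set.update st (pvCliques ncs [] k.toNat all_tasks))
        PySem.Set.empty
    valid.foldl
      (fun xl a =>
        let succ : PySem.Set String :=
          PySem.Set.ofList
            (all_tasks.filter (fun y => a.all (fun x => PySem.Set.contains cs (x, y))))
        valid.foldl
          (fun xl b =>
            if b.all (fun y => PySem.Set.contains succ y) then PySem.Set.add xl (a, b) else xl)
          xl)
      PySem.Set.empty

-- ===== PRECONDITION & SPEC =====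
def Spec_make_xl_set (all_tasks : List String) (direct_followers : List (String × String)) (causalities : List (String × String)) (no_causalities : Option (List (String × String))) (out : List (List String × List String)) : Prop := out = make_xl_set_alt all_tasks direct_followers causalities no_causalities
instance (all_tasks : List String) (direct_followers : List (String × String)) (causalities : List (String × String)) (no_causalities : Option (List (String × String))) (out : List (List String × List String)) : Decidable (Spec_make_xl_set all_tasks direct_followers causalities no_causalities out) := by unfold Spec_make_xl_set; infer_instance

-- ===== CLAIM (what is proved, stated in full; the proofs are below) =====
def Claim_equal_make_xl_set : Prop := ∀ (all_tasks : List String) (direct_followers : List (String × String)) (causalities : List (String × String)) (no_causalities : Option (List (String × String))), Dom_make_xl_set all_tasks direct_followers causalities no_causalities → Spec_make_xl_set all_tasks direct_followers causalities no_causalities (make_xl_set all_tasks direct_followers causalities no_causalities)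

-- ===== LEMMAS AND PROOFS =====

-- membership in set(l) is membership in l
theorem pv_contains_ofList {α : Type} [BEq α] [LawfulBEq α] (l : List α) (x : α) :
    PySem.Set.contains (PySem.Set.ofList l) x = l.contains x := by
  simp [pysem]

-- a guarded fold over a filtered list is the doubly-guarded fold over the whole list
theorem pv_foldl_filter_if {α σ : Type} (p q : α → Bool) (f : σ → α → σ)
    (l : List α) (init : σ) :
    (l.filter p).foldl (fun st x => if q x then f st x else st) init
      = l.foldl (fun st x => if p x && q x then f st x else st) init := by
  rw [List.foldl_filter]
  induction l generalizing init with
  | nil => rfl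
  | cons x xs ih =>
    simp only [List.foldl_cons]
    by_cases hp : p x = true <;> by_cases hq : q x = true <;>
      simp [hp, hq, ih]

-- the nested guarded folds of A collapse to folds over the filtered list
theorem pv_nested_filter {α σ : Type} (p : α → Bool) (q : α → α → Bool)
    (f : σ → α × α → σ) (L : List α) (init : σ) :
    L.foldl
      (fun st a => L.foldl
        (fun st b => if p a && p b && q a b then f st (a, b) else st) st) init
      = (L.filter p).foldl
          (fun st a => (L.filter p).foldl
            (fun st b => if q a b then f st (a, b) else st) st) init := by
  have step : ∀ (a : α) (st : σ),
      L.foldl (fun st b => if p a && p b && q a b then f st (a, b) else st) st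
        = if p a then
            (L.filter p).foldl (fun st b => if q a b then f st (a, b) else st) st
          else st := by
    intro a st
    by_cases hp : p a = true
    · rw [if_pos hp, pv_foldl_filter_if]
      simp [hp]
    · simp only [Bool.not_eq_true] at hp
      simp [hp, List.foldl_fixed]
  calc L.foldl (fun st a => L.foldl
          (fun st b => if p a && p b && q a b then f st (a, b) else st) st) init
      = L.foldl (fun st a => if p a then
          (L.filter p).foldl (fun st b => if q a b then f st (a, b) else st) st
          else st) init := by
        exact List.foldl_ext _ _ init (fun st a _ => step a st)
    _ = (L.filter p).foldl (fun st a => (L.filter p).foldl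
          (fun st b => if q a b then f st (a, b) else st) st) init := by
        rw [List.foldl_filter]

-- A's check_set on a non-None argument, as a membership statement
theorem pv_checkSet_iff (ncl : List (String × String)) (s : List String) :
    pvCheckSet s (some ncl) = true ↔ ∀ x ∈ s, ∀ y ∈ s, (x, y) ∈ ncl := by
  simp [pvCheckSet, List.all_eq_true]

-- compatibility, as a membership statement
theorem pv_compat_iff (ncl : List (String × String)) (acc : List String) (x : String) :
    pvCompat (PySem.Set.ofList ncl) acc x = true
      ↔ (x, x) ∈ ncl ∧ ∀ z ∈ acc, (z, x) ∈ ncl ∧ (x, z) ∈ ncl := by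
  simp [pvCompat, List.all_eq_true]

-- extending a clique by a compatible element keeps it a clique
theorem pv_clique_extend (ncl : List (String × String)) (acc : List String) (x : String)
    (hacc : pvCheckSet acc (some ncl) = true)
    (hx : pvCompat (PySem.Set.ofList ncl) acc x = true) :
    pvCheckSet (acc ++ [x]) (some ncl) = true := by
  rw [pv_checkSet_iff] at hacc ⊢
  rw [pv_compat_iff] at hx
  intro a ha b hb
  simp only [List.mem_append, List.mem_singleton] at ha hb
  rcases ha with ha | rfl <;> rcases hb with hb | rfl
  · exact hacc a ha b hb
  · exact (hx.2 a ha).1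
  · exact (hx.2 b hb).2
  · exact hx.1

-- an incompatible element kills every extension
theorem pv_clique_break (ncl : List (String × String)) (acc : List String) (x : String)
    (t : List String) (hx : ¬ pvCompat (PySem.Set.ofList ncl) acc x = true) :
    pvCheckSet (acc ++ x :: t) (some ncl) = false := by
  rw [← Bool.not_eq_true, pv_checkSet_iff]
  intro h
  apply hx
  rw [pv_compat_iff]
  have hxm : x ∈ acc ++ x :: t := by simp
  refine ⟨h x hxm x hxm, fun z hz => ?_⟩
  have hzm : z ∈ acc ++ x :: t := by simp [hz]
  exact ⟨h z hzm x hxm, h x hxm z hzm⟩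

-- B's pruned backtracking generates exactly the cliques among the combinations
theorem pv_cliques_eq_filter (ncl : List (String × String)) :
    ∀ (xs : List String) (k : Nat) (acc : List String),
      pvCheckSet acc (some ncl) = true →
      pvCliques (PySem.Set.ofList ncl) acc k xs
        = ((pvCombos k xs).map (fun t => acc ++ t)).filter
            (fun s => pvCheckSet s (some ncl)) := by
  intro xs
  induction xs with
  | nil =>
    intro k acc hacc
    cases k with
    | zero => simp [pvCliques, pvCombos, hacc]
    | succ k => simp [pvCliques, pvCombos]
  | cons x xs ih =>
    intro k acc hacc
    cases k with
    | zero => simp [pvCliques, pvCombos, hacc]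
    | succ k =>
      simp only [pvCliques, pvCombos, List.map_append, List.filter_append, List.map_map]
      by_cases hc : pvCompat (PySem.Set.ofList ncl) acc x = true
      · rw [if_pos hc, ih k (acc ++ [x]) (pv_clique_extend ncl acc x hacc hc), ih (k + 1) acc hacc]
        simp [Function.comp_def]
      · rw [if_neg hc, ih (k + 1) acc hacc]
        have : ((pvCombos k xs).map ((fun t => acc ++ t) ∘ fun t => x :: t)).filter
            (fun s => pvCheckSet s (some ncl)) = [] := by
          rw [List.filter_eq_nil_iff]
          intro s hs
          simp only [List.mem_map, Function.comp] at hs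
          obtain ⟨t, _, rfl⟩ := hs
          simp [pv_clique_break ncl acc x t hc]
        rw [this]

-- folding Set.update over a list of blocks is one update by the flattened list
theorem pv_foldl_update {α β : Type} [BEq α] (f : β → List α) (ks : List β)
    (s : PySem.Set α) :
    ks.foldl (fun st i => PySem.Set.update st (f i)) s
      = PySem.Set.update s (ks.flatMap f) := by
  induction ks generalizing s with
  | nil => simp [PySem.Set.update]
  | cons k ks ih => simp [List.foldl_cons, ih, PySem.Set.update_append]

-- first-occurrence dedup commutes with filter
theorem pv_filter_ofList {α : Type} [BEq α] [LawfulBEq α] (p : α → Bool) (l : List α) :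
    (PySem.Set.ofList l).filter p = PySem.Set.ofList (l.filter p) := by
  induction l using List.reverseRecOn with
  | nil => rfl
  | append_singleton xs x ih =>
    rw [PySem.Set.ofList_append_singleton, PySem.Set.add_eq_ite, List.filter_append]
    by_cases hp : p x = true
    · simp only [List.filter_cons, hp, List.filter_nil, if_true]
      rw [PySem.Set.ofList_append_singleton, PySem.Set.add_eq_ite]
      by_cases hm : x ∈ PySem.Set.ofList xs
      · have hm' : x ∈ PySem.Set.ofList (xs.filter p) := by
          rw [PySem.Set.mem_ofList] at hm ⊢
          exact List.mem_filter.mpr ⟨hm, hp⟩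
        rw [if_pos hm, if_pos hm', ih]
      · have hm' : x ∉ PySem.Set.ofList (xs.filter p) := by
          rw [PySem.Set.mem_ofList] at hm ⊢
          exact fun h => hm (List.mem_filter.mp h).1
        rw [if_neg hm, if_neg hm', List.filter_append, ih]
        simp [hp]
    · simp only [List.filter_cons, hp, Bool.false_eq_true, if_false, List.filter_nil,
        List.append_nil]
      by_cases hm : x ∈ PySem.Set.ofList xs
      · rw [if_pos hm, ih]
      · rw [if_neg hm, List.filter_append, ih]
        simp [hp]

-- elements of a combination come from the source list
theorem pv_mem_combos : ∀ (xs : List String) (k : Nat) (t : List String),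
    t ∈ pvCombos k xs → ∀ y ∈ t, y ∈ xs := by
  intro xs
  induction xs with
  | nil =>
    intro k t ht
    cases k with
    | zero => simp [pvCombos] at ht; simp [ht]
    | succ k => simp [pvCombos] at ht
  | cons x xs ih =>
    intro k t ht
    cases k with
    | zero =>
      simp [pvCombos] at ht; simp [ht]
    | succ k =>
      simp only [pvCombos, List.mem_append, List.mem_map] at ht
      rcases ht with ⟨t', ht', rfl⟩ | ht
      · intro y hy
        rcases List.mem_cons.mp hy with rfl | hy
        · exact List.mem_cons_self
        · exact List.mem_cons_of_mem _ (ih k t' ht' y hy)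
      · intro y hy
        exact List.mem_cons_of_mem _ (ih (k + 1) t ht y hy)

-- the successor-set test equals A's pairwise causality scan, for b drawn from all_tasks
theorem pv_guard_eq (causalities : List (String × String)) (all_tasks : List String)
    (a b : List String) (hb : ∀ y ∈ b, y ∈ all_tasks) :
    (b.all (fun y => PySem.Set.contains
        (PySem.Set.ofList (all_tasks.filter
          (fun y => a.all (fun x => PySem.Set.contains (PySem.Set.ofList causalities) (x, y))))) y))
      = pvCheckOutsets a b causalities := by
  have h : ∀ x, ((x = true) ↔ (pvCheckOutsets a b causalities = true)) →
      x = pvCheckOutsets a b causalities := by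
    intro x hx
    cases x <;> cases hcb : pvCheckOutsets a b causalities <;>
      simp_all
  apply h
  simp only [pv_contains_ofList, pvCheckOutsets, List.all_eq_true,
    List.contains_eq_mem, List.mem_filter, decide_eq_true_eq]
  constructor
  · intro hall x hx y hy
    exact ((hall y hy).2 x hx)
  · intro hall y hy
    exact ⟨hb y hy, fun x hx => hall x hx y hy⟩

-- ===== VERDICT (by name: the statement is the Claim_ definition above) =====
theorem make_xl_set_spec : Claim_equal_make_xl_set := by
  intro all_tasks direct_followers causalities no_causalities _
  unfold Spec_make_xl_set make_xl_set make_xl_set_alt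
  cases no_causalities with
  | none =>
    simp [pvCheckSet, List.foldl_fixed]
  | some ncl =>
    simp only []
    rw [pv_nested_filter (fun s => pvCheckSet s (some ncl))
        (fun a b => pvCheckOutsets a b causalities) (fun st x => PySem.Set.add st x)]
    -- both subset accumulators are ofList of the flattened streams
    have hsubA :
        (PySem.List.pyRange 1 (all_tasks.length : Int) 1).foldl
          (fun st i => (pvCombos i.toNat all_tasks).foldl (fun st s => PySem.Set.add st s) st)
          PySem.Set.empty
        = PySem.Set.ofList
            ((PySem.List.pyRange 1 (all_tasks.length : Int) 1).flatMap
              (fun i => pvCombos i.toNat all_tasks)) := by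
      rw [show (fun (st : PySem.Set (List String)) (i : Int) =>
            (pvCombos i.toNat all_tasks).foldl (fun st s => PySem.Set.add st s) st)
          = (fun st i => PySem.Set.update st (pvCombos i.toNat all_tasks)) from rfl]
      rw [pv_foldl_update]
      rfl
    have hsubB :
        (PySem.List.pyRange 1 (all_tasks.length : Int) 1).foldl
          (fun st k => PySem.Set.update st
            (pvCliques (PySem.Set.ofList ncl) [] k.toNat all_tasks))
          PySem.Set.empty
        = PySem.Set.ofList
            ((PySem.List.pyRange 1 (all_tasks.length : Int) 1).flatMap
              (fun i => pvCliques (PySem.Set.ofList ncl) [] i.toNat all_tasks)) := by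
      rw [pv_foldl_update]
      rfl
    rw [hsubA, hsubB]
    -- the filtered subset list IS the pruned clique list
    have hval :
        (PySem.Set.ofList
            ((PySem.List.pyRange 1 (all_tasks.length : Int) 1).flatMap
              (fun i => pvCombos i.toNat all_tasks))).filter
          (fun s => pvCheckSet s (some ncl))
        = PySem.Set.ofList
            ((PySem.List.pyRange 1 (all_tasks.length : Int) 1).flatMap
              (fun i => pvCliques (PySem.Set.ofList ncl) [] i.toNat all_tasks)) := by
      rw [pv_filter_ofList]
      congr 1
      rw [List.filter_flatMap]
      congr 1
      funext i
      rw [pv_cliques_eq_filter ncl all_tasks i.toNat [] (by simp [pvCheckSet])]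
      simp
    rw [hval]
    -- finally, the guards agree on every generated pair
    have hmem : ∀ b ∈ PySem.Set.ofList
        ((PySem.List.pyRange 1 (all_tasks.length : Int) 1).flatMap
          (fun i => pvCliques (PySem.Set.ofList ncl) [] i.toNat all_tasks)),
        ∀ y ∈ b, y ∈ all_tasks := by
      intro b hb
      rw [← hval] at hb
      have hb' := (PySem.Set.mem_ofList _ _).mp (List.mem_of_mem_filter hb)
      rw [List.mem_flatMap] at hb'
      obtain ⟨i, _, hbc⟩ := hb'
      exact pv_mem_combos all_tasks i.toNat b hbc
    apply PySem.List.foldl_congr_mem'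
    intro a _ xl
    apply PySem.List.foldl_congr_mem'
    intro b hbL xl'
    rw [pv_guard_eq causalities all_tasks a b (hmem b hbL)]
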